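-- pv_equiv track=rewrite | github.com/Ludovicscelles/python-quests | revisions/revisions_2.py | capitalize_certain_vowels_2
-- ===== SOURCE A (Python) =====
-- def capitalize_certain_vowels_2(string_2):
--
--   vowels = "aeiouy"
--   result = []
--
--   for index, letter in enumerate(string_2.lower()):
--     if index % 2 == 0 and letter in vowels:
--       result.append(letter.upper())
--     else:
--       result.append(letter)
--
--   return "".join(result)
-- ===== SOURCE B (Python) =====
-- VOWELS = "aeiouy"
--
--
-- def _split_alt(cs):
--     """Split a list of chars into (chars at even indices, chars at odd indices)."""
--     evens, odds = [], []
--     i, n = 0, len(cs)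
--     while i + 1 < n:
--         evens.append(cs[i])
--         odds.append(cs[i + 1])
--         i += 2
--     if i < n:
--         evens.append(cs[i])
--     return evens, odds
--
--
-- def _interleave(xs, ys):
--     """Interleave xs and ys starting with xs; xs may be one longer than ys."""
--     out = []
--     for x, y in zip(xs, ys):
--         out.append(x)
--         out.append(y)
--     if len(ys) < len(xs):
--         out.append(xs[-1])
--     return out
--
--
-- def capitalize_certain_vowels_2(string_2):
--     evens, odds = _split_alt(list(string_2.lower()))
--     evens = [c.upper() if c in VOWELS else c for c in evens]
--     return "".join(_interleave(evens, odds))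
-- ===== Notes on version B (the rewrite author's own statement) =====
-- stated objective: alternative
-- what changed: Instead of one indexed loop testing index parity per character, B splits the lowered string into its even- and odd-position subsequences by two-at-a-time recursion, uppercases vowels only in the even half, and interleaves the halves back together.
import Mathlib
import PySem

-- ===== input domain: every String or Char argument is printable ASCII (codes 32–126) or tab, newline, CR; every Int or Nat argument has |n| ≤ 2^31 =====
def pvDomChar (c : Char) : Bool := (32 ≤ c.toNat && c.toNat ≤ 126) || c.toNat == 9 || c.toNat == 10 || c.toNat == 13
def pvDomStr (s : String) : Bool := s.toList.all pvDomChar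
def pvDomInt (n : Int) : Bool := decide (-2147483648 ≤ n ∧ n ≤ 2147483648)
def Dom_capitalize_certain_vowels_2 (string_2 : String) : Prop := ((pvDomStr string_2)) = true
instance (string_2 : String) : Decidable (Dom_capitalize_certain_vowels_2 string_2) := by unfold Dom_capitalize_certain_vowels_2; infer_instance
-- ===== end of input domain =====

-- B replaces A's single indexed loop with a parity test by a split of the lowered string into
-- even/odd-position halves, a vowel-uppercasing map over the even half, and a zip-based interleave (alternative decomposition).


-- ===== PORT A =====
-- 'letter in vowels' on the 1-char letter is exactly char membership in the vowel chars;
-- '"".join(result)' over single-char strings is exactly String.ofList of the chars.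
def capitalize_certain_vowels_2 (string_2 : String) : String :=
  let vowels : List Char := "aeiouy".toList
  let result : List Char :=
    (PySem.List.enumerate (PySem.Str.lower string_2).toList 0).foldl
      (fun acc p =>
        if PySem.Int.mod p.1 2 = 0 ∧ p.2 ∈ vowels then acc ++ [PySem.Chars.upperChar p.2]
        else acc ++ [p.2]) []
  String.ofList result

-- ===== PORT B =====
-- _split_alt's while loop consumes two chars per iteration, appending to evens/odds (ev, od accumulators);
-- the trailing 'if i < n' append is the single-char case.
def pvSplitAlt : List Char → List Char → List Char → List Char × List Char
  | ev, od, [] => (ev, od)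
  | ev, od, [c] => (ev ++ [c], od)
  | ev, od, c1 :: c2 :: rest => pvSplitAlt (ev ++ [c1]) (od ++ [c2]) rest

-- _interleave: fold over zip(xs, ys), then append xs[-1] if xs is longer; Python's xs[-1] is
-- PySem.List.pyGet? xs (-1) (Option.toList is only a totality guard — the branch implies xs ≠ []).
def pvInterleave (xs ys : List Char) : List Char :=
  let out := (xs.zip ys).foldl (fun acc q => acc ++ [q.1, q.2]) []
  if ys.length < xs.length then out ++ (PySem.List.pyGet? xs (-1)).toList else out

def capitalize_certain_vowels_2_alt (string_2 : String) : String :=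
  let p := pvSplitAlt [] [] (PySem.Str.lower string_2).toList
  let evens := p.1.map (fun c => if c ∈ "aeiouy".toList then PySem.Chars.upperChar c else c)
  String.ofList (pvInterleave evens p.2)

-- ===== PRECONDITION & SPEC =====
def Spec_capitalize_certain_vowels_2 (string_2 : String) (out : String) : Prop := out = capitalize_certain_vowels_2_alt string_2
instance (string_2 : String) (out : String) : Decidable (Spec_capitalize_certain_vowels_2 string_2 out) := by unfold Spec_capitalize_certain_vowels_2; infer_instance

-- ===== CLAIM (what is proved, stated in full; the proofs are below) =====
def Claim_equal_capitalize_certain_vowels_2 : Prop := ∀ (string_2 : String), Dom_capitalize_certain_vowels_2 string_2 → Spec_capitalize_certain_vowels_2 string_2 (capitalize_certain_vowels_2 string_2)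

-- ===== LEMMAS AND PROOFS =====

-- A's loop body as a standalone function, and the even-position transform
def pvStepA (acc : List Char) (p : Int × Char) : List Char :=
  if PySem.Int.mod p.1 2 = 0 ∧ p.2 ∈ "aeiouy".toList then acc ++ [PySem.Chars.upperChar p.2]
  else acc ++ [p.2]

def pvF (c : Char) : Char := if c ∈ "aeiouy".toList then PySem.Chars.upperChar c else c

-- proof-side recursive characterisations of the split and the interleave
def sSplit : List Char → List Char × List Char
  | [] => ([], [])
  | [c] => ([c], [])
  | c1 :: c2 :: rest =>
      let p := sSplit rest
      (c1 :: p.1, c2 :: p.2)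

def sInt : List Char → List Char → List Char
  | [], ys => ys
  | x :: xs, [] => x :: xs
  | x :: xs, y :: ys => x :: y :: sInt xs ys

lemma pvStepA_even (acc : List Char) (i : Int) (c : Char) (h : 2 ∣ i) :
    pvStepA acc (i, c) = acc ++ [pvF c] := by
  unfold pvStepA pvF
  by_cases hc : c ∈ "aeiouy".toList
  · rw [if_pos ⟨(PySem.Int.mod_eq_zero_iff_dvd i 2).mpr h, hc⟩, if_pos hc]
  · rw [if_neg (fun hh => hc hh.2), if_neg hc]

lemma pvStepA_odd (acc : List Char) (i : Int) (c : Char) (h : ¬ 2 ∣ i) :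
    pvStepA acc (i, c) = acc ++ [c] := by
  unfold pvStepA
  rw [if_neg (fun hh => h ((PySem.Int.mod_eq_zero_iff_dvd i 2).mp hh.1))]

-- A's loop, started at any even index, produces the interleave of the transformed even half with the odd half
lemma pvLoop_eq (L : List Char) : ∀ (m : Int), 2 ∣ m → ∀ (acc : List Char),
    (PySem.List.enumerate L m).foldl pvStepA acc
      = acc ++ sInt ((sSplit L).1.map pvF) (sSplit L).2 := by
  induction L using sSplit.induct with
  | case1 =>
      intro m _ acc
      simp [PySem.List.enumerate_nil, sSplit, sInt]
  | case2 c =>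
      intro m hm acc
      rw [PySem.List.enumerate_cons, PySem.List.enumerate_nil, List.foldl_cons, List.foldl_nil,
        pvStepA_even acc m c hm]
      simp [sSplit, sInt]
  | case3 c1 c2 rest ih =>
      intro m hm acc
      rw [PySem.List.enumerate_cons, PySem.List.enumerate_cons, List.foldl_cons, List.foldl_cons,
        pvStepA_even acc m c1 hm, pvStepA_odd _ _ c2 (by omega), ih (m + 1 + 1) (by omega)]
      simp [sSplit, sInt]

-- B's accumulator split equals the recursive split
lemma pvSplit_go : ∀ (L ev od : List Char),
    pvSplitAlt ev od L = (ev ++ (sSplit L).1, od ++ (sSplit L).2) := by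
  intro L
  induction L using sSplit.induct with
  | case1 => intro ev od; simp [pvSplitAlt, sSplit]
  | case2 c => intro ev od; simp [pvSplitAlt, sSplit]
  | case3 c1 c2 rest ih => intro ev od; simp [pvSplitAlt, sSplit, ih]

lemma pvSplit_len (L : List Char) :
    (sSplit L).2.length ≤ (sSplit L).1.length ∧ (sSplit L).1.length ≤ (sSplit L).2.length + 1 := by
  induction L using sSplit.induct with
  | case1 => simp [sSplit]
  | case2 c => simp [sSplit]
  | case3 c1 c2 rest ih => simp [sSplit]; omega

lemma pvGetNegOne (xs : List Char) : PySem.List.pyGet? xs (-1) = xs.getLast? := by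
  simp only [PySem.List.pyGet?, PySem.List.pyIdx?, Int.reduceNeg, Int.neg_nonneg, Int.reduceLE,
    reduceIte, neg_le_neg_iff, Nat.one_le_cast, neg_neg, Int.toNat_one]
  cases xs with
  | nil => simp
  | cons a as => simp [List.getLast?_eq_getElem?]

lemma pvInter_unfold (xs ys : List Char) :
    pvInterleave xs ys = (xs.zip ys).flatMap (fun q => [q.1, q.2])
      ++ (if ys.length < xs.length then xs.getLast?.toList else []) := by
  unfold pvInterleave
  rw [PySem.List.foldl_append_eq_flatMap (fun q : Char × Char => [q.1, q.2]) (xs.zip ys) [],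
    pvGetNegOne]
  split_ifs <;> simp

-- B's zip-based interleave equals the recursive one when xs is at most one longer than ys
lemma pvInter_eq : ∀ (xs ys : List Char), ys.length ≤ xs.length → xs.length ≤ ys.length + 1 →
    pvInterleave xs ys = sInt xs ys := by
  intro xs
  induction xs with
  | nil =>
      intro ys h1 _
      have : ys = [] := by simpa using h1
      subst this
      simp [pvInterleave, sInt]
  | cons x xs ih =>
      intro ys h1 h2
      cases ys with
      | nil =>
          have : xs = [] := by
            cases xs with
            | nil => rfl
            | cons a as => simp at h2
          subst this
          simp [pvInter_unfold, sInt]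
      | cons y ys =>
          have h3 : ys.length ≤ xs.length := by simp at h1; omega
          have h4 : xs.length ≤ ys.length + 1 := by simp at h2; omega
          rw [pvInter_unfold, List.zip_cons_cons, List.flatMap_cons, sInt,
            ← ih ys h3 h4, pvInter_unfold]
          by_cases hlt : ys.length < xs.length
          · have hxs : xs ≠ [] := by intro h; subst h; simp at hlt
            cases xs with
            | nil => simp at hlt
            | cons a as =>
                rw [if_pos (by have := hlt; simp at this ⊢; omega), if_pos hlt, List.getLast?_cons_cons]
                simp
          · rw [if_neg (by simp; omega), if_neg hlt]
            simp

-- ===== VERDICT (by name: the statement is the Claim_ definition above) =====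
theorem capitalize_certain_vowels_2_spec : Claim_equal_capitalize_certain_vowels_2 := by
  intro s _
  unfold Spec_capitalize_certain_vowels_2 capitalize_certain_vowels_2 capitalize_certain_vowels_2_alt
  have h := pvLoop_eq (PySem.Str.lower s).toList 0 ⟨0, rfl⟩ []
  have hlen := pvSplit_len (PySem.Str.lower s).toList
  have hint := pvInter_eq ((sSplit (PySem.Str.lower s).toList).1.map pvF)
    (sSplit (PySem.Str.lower s).toList).2
    (by rw [List.length_map]; exact hlen.1) (by rw [List.length_map]; exact hlen.2)
  rw [List.nil_append] at h
  rw [pvSplit_go, List.nil_append, List.nil_append]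
  unfold pvF at h hint
  rw [← hint] at h
  exact congrArg String.ofList h
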